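-- pv_equiv track=rewrite | github.com/benrose258/Python | Python 2.7 Files/Classwork/CS 110/Practice exam 3 Document 2.py | checkformember
-- ===== SOURCE A (Python) =====
-- def checkformember(x,answer,mylist):
--     if answer == True:
--         return True
--     if mylist == [] and answer == False:
--         return False
--     else:
--         if mylist[0]==x:
--             answer = True
--             return checkformember(x,answer,mylist)
--         else:
--             return checkformember(x,answer,mylist[1:])
-- ===== SOURCE B (Python) =====
-- def checkformember(x, answer, mylist):
--     return answer or x in mylist
-- ===== Notes on version B (the rewrite author's own statement) =====
-- stated objective: idiomatic
-- what changed: Replaced the slicing recursion (which also re-recurses with answer=True before returning) by a single short-circuit membership expression 'answer or x in mylist'.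
import Mathlib
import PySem

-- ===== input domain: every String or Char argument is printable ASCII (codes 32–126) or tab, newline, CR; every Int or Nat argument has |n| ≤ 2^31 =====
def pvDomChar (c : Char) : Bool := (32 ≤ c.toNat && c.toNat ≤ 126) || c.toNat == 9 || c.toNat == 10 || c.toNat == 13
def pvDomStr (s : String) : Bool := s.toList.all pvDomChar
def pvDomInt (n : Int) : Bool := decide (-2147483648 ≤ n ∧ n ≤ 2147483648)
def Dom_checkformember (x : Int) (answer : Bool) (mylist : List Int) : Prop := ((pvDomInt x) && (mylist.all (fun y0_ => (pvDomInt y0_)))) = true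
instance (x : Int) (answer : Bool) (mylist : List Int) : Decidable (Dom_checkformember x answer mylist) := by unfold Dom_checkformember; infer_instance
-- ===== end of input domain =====

-- B replaces A's slicing recursion by the idiomatic short-circuit 'answer or x in mylist'.
-- Equivalence is about the return value; neither version mutates its arguments.

-- ===== PORT A =====
-- A recurses with answer := True on the same list when the head matches, and on mylist[1:] otherwise.
-- The bare 'mylist[0]' branch is unreachable for a Bool 'answer' (the two ifs above cover []).
def checkformember (x : Int) (answer : Bool) (mylist : List Int) : Bool :=
  if answer == true then true
  else if mylist == [] && answer == false then false
  else
    match mylist with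
    | [] => false  -- unreachable: for Bool answer the empty list is caught by the branches above
    | h :: t =>
      if h == x then checkformember x true (h :: t)
      else checkformember x answer t
termination_by (if answer then 0 else mylist.length + 1)
decreasing_by
  all_goals simp_all

-- ===== PORT B =====
def checkformember_alt (x : Int) (answer : Bool) (mylist : List Int) : Bool :=
  answer || mylist.contains x

-- ===== PRECONDITION & SPEC =====
def Spec_checkformember (x : Int) (answer : Bool) (mylist : List Int) (out : Bool) : Prop := out = checkformember_alt x answer mylist
instance (x : Int) (answer : Bool) (mylist : List Int) (out : Bool) : Decidable (Spec_checkformember x answer mylist out) := by unfold Spec_checkformember; infer_instance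

-- ===== CLAIM (what is proved, stated in full; the proofs are below) =====
def Claim_equal_checkformember : Prop := ∀ (x : Int) (answer : Bool) (mylist : List Int), Dom_checkformember x answer mylist → Spec_checkformember x answer mylist (checkformember x answer mylist)

-- ===== LEMMAS AND PROOFS =====
theorem checkformember_true (x : Int) (l : List Int) : checkformember x true l = true := by
  unfold checkformember; simp

theorem checkformember_eq (x : Int) (answer : Bool) (l : List Int) :
    checkformember x answer l = (answer || l.contains x) := by
  cases answer with
  | true => simp [checkformember_true]
  | false =>
    induction l with
    | nil => rw [checkformember.eq_def]; rfl
    | cons h t ih =>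
      rw [checkformember.eq_def]
      cases hx : h == x with
      | true =>
        simp [hx, checkformember_true]
        exact Or.inl (beq_iff_eq.mp hx).symm
      | false =>
        simp [hx, ih]
        intro he; simp [he] at hx

-- ===== VERDICT (by name: the statement is the Claim_ definition above) =====
theorem checkformember_spec : Claim_equal_checkformember := by
  intro x answer mylist _
  unfold Spec_checkformember checkformember_alt
  exact checkformember_eq x answer mylist
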